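-- pv_equiv track=rewrite | github.com/rookinc/xalchemy_lab | src/xalchemy_lab/paper/run_sector_trace_exception_probe.py | canonical_trace
-- ===== SOURCE A (Python) =====
-- def canonical_trace(trace):
--     n = len(trace)
--     rots = []
--     for i in range(n):
--         rots.append(tuple(trace[i:] + trace[:i]))
--     rev = list(reversed(trace))
--     for i in range(n):
--         rots.append(tuple(rev[i:] + rev[:i]))
--     return min(rots)
-- ===== SOURCE B (Python) =====
-- def canonical_trace(trace):
--     # Column-wise candidate elimination: keep the set of start positions (in the
--     # doubled trace and doubled reversal) whose windows share the minimal prefix,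
--     # refining one position per round; no full rotation is ever materialized or
--     # compared against another.
--     n = len(trace)
--     d = trace + trace
--     rev = trace[::-1]
--     dr = rev + rev
--
--     def at(j, k):
--         return d[j + k] if j < n else dr[j - n + k]
--
--     cands = list(range(2 * n))
--     for k in range(n):
--         if len(cands) == 1:
--             break
--         best = min(at(j, k) for j in cands)
--         cands = [j for j in cands if at(j, k) == best]
--     j = cands[0]
--     return tuple(d[j:j + n]) if j < n else tuple(dr[j - n:j - n + n])
-- ===== Notes on version B (the rewrite author's own statement) =====
-- stated objective: alternative
-- what changed: A materializes all 2n rotations as tuples and takes min with full lexicographic comparisons; B never builds or compares whole rotations: it refines the set of candidate start positions column by column (each round keeps the starts whose window has the minimal element at the current position, stopping when one start remains) and slices out the single winning window at the end.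
import Mathlib
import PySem

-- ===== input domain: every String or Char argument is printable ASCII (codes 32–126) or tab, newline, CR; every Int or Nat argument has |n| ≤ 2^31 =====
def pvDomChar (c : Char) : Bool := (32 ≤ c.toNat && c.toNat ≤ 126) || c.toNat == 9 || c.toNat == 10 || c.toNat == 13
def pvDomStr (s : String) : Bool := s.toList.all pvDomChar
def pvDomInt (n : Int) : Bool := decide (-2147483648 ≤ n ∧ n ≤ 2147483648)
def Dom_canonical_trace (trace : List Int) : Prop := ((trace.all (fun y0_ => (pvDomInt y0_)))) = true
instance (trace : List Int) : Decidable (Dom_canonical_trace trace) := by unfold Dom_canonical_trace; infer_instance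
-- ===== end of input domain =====

-- B replaces "materialize all 2n rotations and take min" by column-wise candidate elimination:
-- it keeps the start positions whose windows share the minimal prefix, refining one position per
-- round, and never compares two whole rotations; objective: alternative.

-- ===== PORT A =====
def canonical_trace (trace : List Int) : List Int :=
  let n : Int := (trace.length : Int)
  let rots : List (List Int) :=
    (PySem.List.pyRange 0 n 1).foldl
      (fun acc i => acc ++ [PySem.List.slice trace (some i) none ++ PySem.List.slice trace none (some i)]) []
  let rev : List Int := trace.reverse
  let rots2 : List (List Int) :=
    (PySem.List.pyRange 0 n 1).foldl
      (fun acc i => acc ++ [PySem.List.slice rev (some i) none ++ PySem.List.slice rev none (some i)]) rots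
  match PySem.List.min? rots2 (fun x => x) with
  | some m => m
  | none => []   -- min([]) raises ValueError in Python; excluded by Pre_

-- ===== PORT B =====
-- at(j, k) of Source B; the algorithm only calls it with indices in range, so pyGetD's default is never used
def pvAt (d dr : List Int) (n : Int) (j k : Int) : Int :=
  if j < n then PySem.List.pyGetD d (j + k) 0 else PySem.List.pyGetD dr (j - n + k) 0

-- the 'for k in range(n): … break …' loop of Source B; the fuel r counts the remaining rounds (r = n - k)
def pvLoop (d dr : List Int) (n : Int) : Nat → Int → List Int → List Int
  | 0, _, cands => cands
  | r + 1, k, cands =>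
    if cands.length = 1 then cands
    else
      let best : Int := (PySem.List.min? (cands.map (fun j => pvAt d dr n j k)) (fun x => x)).getD 0
      pvLoop d dr n r (k + 1) (cands.filter (fun j => pvAt d dr n j k == best))

def canonical_trace_alt (trace : List Int) : List Int :=
  let n : Int := (trace.length : Int)
  let d : List Int := trace ++ trace
  let rev : List Int := trace.reverse
  let dr : List Int := rev ++ rev
  match pvLoop d dr n trace.length 0 (PySem.List.pyRange 0 (2 * n) 1) with
  | [] => []   -- cands[0] raises IndexError in Python on the empty trace; excluded by Pre_
  | j :: _ =>
    if j < n then PySem.List.slice d (some j) (some (j + n))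
    else PySem.List.slice dr (some (j - n)) (some (j - n + n))

-- ===== PRECONDITION & SPEC =====
-- Pre_ excludes only the empty trace, on which A raises ValueError (min of an empty sequence)
-- and B raises IndexError (cands[0]).
def Pre_canonical_trace (trace : List Int) : Prop := trace ≠ []
instance (trace : List Int) : Decidable (Pre_canonical_trace trace) := by unfold Pre_canonical_trace; infer_instance
def pvWitness_canonical_trace : List Int := [2, 1, 3]

def Spec_canonical_trace (trace : List Int) (out : List Int) : Prop := out = canonical_trace_alt trace
instance (trace : List Int) (out : List Int) : Decidable (Spec_canonical_trace trace out) := by unfold Spec_canonical_trace; infer_instance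

-- ===== CLAIM (what is proved, stated in full; the proofs are below) =====
def Claim_equal_canonical_trace : Prop := ∀ (trace : List Int), Dom_canonical_trace trace → Pre_canonical_trace trace → Spec_canonical_trace trace (canonical_trace trace)


-- ===== LEMMAS AND PROOFS =====

-- the rotation of t that starts at position jn of the doubled trace (jn < n) / doubled reversal (n ≤ jn < 2n)
def pvW (t : List Int) (jn : Nat) : List Int :=
  if jn < t.length then t.drop jn ++ t.take jn
  else t.reverse.drop (jn - t.length) ++ t.reverse.take (jn - t.length)

theorem pvW_length (t : List Int) (jn : Nat) : (pvW t jn).length = t.length := by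
  unfold pvW
  split_ifs with h
  · simp
    omega
  · simp
    omega

-- strict lex order extends from equal-length prefixes to any extensions
theorem pv_lex_append_aux : ∀ (x y a b : List Int), x.length = y.length →
    List.Lex (· < ·) x y → List.Lex (· < ·) (x ++ a) (y ++ b)
  | [], [], _, _, _, h => by cases h
  | [], _ :: _, _, _, hl, _ => by simp at hl
  | _ :: _, [], _, _, hl, _ => by simp at hl
  | hx :: tx, hy :: ty, a, b, hl, h => by
    cases h with
    | rel hr => exact List.Lex.rel hr
    | cons ht => exact List.Lex.cons (pv_lex_append_aux tx ty a b (by simpa using hl) ht)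

theorem pv_lex_append {x y : List Int} (a b : List Int) (hl : x.length = y.length)
    (h : x < y) : x ++ a < y ++ b := by
  have hL : List.Lex (· < ·) x y := h
  show List.Lex (· < ·) (x ++ a) (y ++ b)
  exact pv_lex_append_aux x y a b hl hL

-- appending a strictly smaller last element
theorem pv_append_singleton_lt (x : List Int) {u v : Int} (h : u < v) : x ++ [u] < x ++ [v] := by
  show List.Lex (· < ·) (x ++ [u]) (x ++ [v])
  induction x with
  | nil => exact List.Lex.rel h
  | cons hd tl ih => exact List.Lex.cons ih

theorem pv_lt_of_take_lt {x y : List Int} (k : Nat) (hl : x.length = y.length)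
    (h : x.take k < y.take k) : x < y := by
  have h2 := pv_lex_append (x.drop k) (y.drop k) (by simp [hl]) h
  simpa using h2

-- the two LT instances on List Int (core lexicographic lt, Mathlib's Lex linear order) are equal
theorem pv_lt_eq : (List.instLT : LT (List Int)) = (LinearOrder.toPartialOrder.toLT : LT (List Int)) := by
  have h : (List.lt : List Int → List Int → Prop) = List.Lex (fun a b : Int => a < b) := by
    funext a b
    exact propext (List.lt_iff_lex_lt a b)
  show ({ lt := List.lt } : LT (List Int)) = _
  rw [h]
  rfl

-- min? does not depend on which (equal) LT instance and which Decidable procedure is used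
theorem pv_min?_congr {I1 I2 : LT (List Int)} (d1 : @DecidableLT (List Int) I1)
    (d2 : @DecidableLT (List Int) I2) (h : I1 = I2) (xs : List (List Int)) :
    @PySem.List.min? (List Int) (List Int) I1 d1 xs (fun x => x)
      = @PySem.List.min? (List Int) (List Int) I2 d2 xs (fun x => x) := by
  subst h
  have hd : d1 = d2 := by
    funext a b
    exact Subsingleton.elim _ _
  rw [hd]

-- the window of the doubled list is pvW's drop-append-take form
theorem pv_win_eq (u : List Int) (j : Nat) (hj : j ≤ u.length) :
    ((u ++ u).drop j).take u.length = u.drop j ++ u.take j := by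
  rw [List.drop_append_of_le_length hj, List.take_append,
      List.take_of_length_le (by rw [List.length_drop]; omega)]
  congr 1
  congr 1
  rw [List.length_drop]
  omega

theorem pv_getD_window (u : List Int) (j k : Nat) (hj : j < u.length) (hk : k < u.length) :
    (u ++ u).getD (j + k) 0 = (u.drop j ++ u.take j).getD k 0 := by
  rw [← pv_win_eq u j (le_of_lt hj)]
  rw [List.getD_eq_getElem _ _ (by simp; omega),
      List.getD_eq_getElem _ _ (by simp; omega)]
  rw [List.getElem_take, List.getElem_drop]

-- pvAt reads column kn of the window starting at jn
theorem pv_at_eq (t : List Int) (jn kn : Nat) (hj : jn < 2 * t.length) (hk : kn < t.length) :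
    pvAt (t ++ t) (t.reverse ++ t.reverse) (t.length : Int) (jn : Int) (kn : Int)
      = (pvW t jn).getD kn 0 := by
  unfold pvAt pvW
  by_cases h : jn < t.length
  · rw [if_pos (by exact_mod_cast h), if_pos h]
    have hidx : (jn : Int) + (kn : Int) = ((jn + kn : Nat) : Int) := by push_cast; ring
    rw [hidx, PySem.List.pyGetD_natCast]
    exact pv_getD_window t jn kn h hk
  · rw [if_neg (by exact_mod_cast h), if_neg h]
    have hidx : (jn : Int) - (t.length : Int) + (kn : Int) = ((jn - t.length + kn : Nat) : Int) := by
      omega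
    rw [hidx, PySem.List.pyGetD_natCast]
    have := pv_getD_window t.reverse (jn - t.length) kn (by simp; omega) (by simp; omega)
    simpa using this

-- B's final slice expression is pvW
theorem pv_rot_slice_eq (t : List Int) (jn : Nat) (hj : jn < 2 * t.length) :
    (if (jn : Int) < (t.length : Int)
      then PySem.List.slice (t ++ t) (some (jn : Int)) (some ((jn : Int) + (t.length : Int)))
      else PySem.List.slice (t.reverse ++ t.reverse) (some ((jn : Int) - (t.length : Int)))
             (some ((jn : Int) - (t.length : Int) + (t.length : Int))))
      = pvW t jn := by
  by_cases h : jn < t.length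
  · rw [if_pos (by exact_mod_cast h)]
    rw [PySem.List.slice_natCast_add, pvW, if_pos h]
    exact pv_win_eq t jn (le_of_lt h)
  · rw [if_neg (by exact_mod_cast h)]
    have hidx : (jn : Int) - (t.length : Int) = ((jn - t.length : Nat) : Int) := by omega
    rw [hidx, PySem.List.slice_natCast_add, pvW, if_neg h]
    have := pv_win_eq t.reverse (jn - t.length) (by simp; omega)
    simpa using this

-- A's rotation expressions are pvW
theorem pv_rotA_eq (t : List Int) (inat : Nat) (h : inat < t.length) :
    PySem.List.slice t (some (inat : Int)) none ++ PySem.List.slice t none (some (inat : Int))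
      = pvW t inat := by
  rw [PySem.List.slice_from_natCast, PySem.List.slice_to_natCast, pvW, if_pos h]

theorem pv_rotR_eq (t : List Int) (inat : Nat) (h : inat < t.length) :
    PySem.List.slice t.reverse (some (inat : Int)) none
        ++ PySem.List.slice t.reverse none (some (inat : Int))
      = pvW t (t.length + inat) := by
  rw [PySem.List.slice_from_natCast, PySem.List.slice_to_natCast, pvW, if_neg (by omega)]
  congr 2 <;> omega

-- the minimum of A's rotation list equals any value that is a member and a lower bound
theorem pv_min_eq {L : List (List Int)} (mA v : List Int)
    (hmA : PySem.List.min? L (fun x => x) = some mA)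
    (hv : v ∈ L) (hlb : ∀ y ∈ L, v ≤ y) : mA = v := by
  have hmA' : @PySem.List.min? (List Int) (List Int) LinearOrder.toPartialOrder.toLT
      LinearOrder.toDecidableLT L (fun x => x) = some mA := by
    rw [← pv_min?_congr _ _ pv_lt_eq L]
    exact hmA
  exact le_antisymm (PySem.List.min?_isMin hmA' v hv) (hlb mA (PySem.List.min?_mem hmA))

-- take (kn+1) of a window, with the kn-th column exposed
theorem pv_take_succ (t : List Int) (jn kn : Nat) (hk : kn < t.length) :
    (pvW t jn).take (kn + 1) = (pvW t jn).take kn ++ [(pvW t jn).getD kn 0] := by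
  have hlt : kn < (pvW t jn).length := by rw [pvW_length]; exact hk
  rw [List.take_succ, List.getElem?_eq_getElem hlt, List.getD_eq_getElem _ _ hlt]
  rfl

theorem pv_take_len (t : List Int) (jn : Nat) :
    (pvW t jn).take t.length = pvW t jn :=
  List.take_of_length_le (by rw [pvW_length])

-- the loop invariant: candidates are in range, share the minimal length-kn prefix, and are
-- strictly below every eliminated start; conclusion: the survivors minimize the full window
theorem pv_loop_spec (t : List Int) : ∀ (r kn : Nat) (C : List Int),
    kn + r = t.length →
    C ≠ [] →
    (∀ j ∈ C, ∃ jn : Nat, j = (jn : Int) ∧ jn < 2 * t.length) →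
    (∀ i ∈ C, ∀ i' ∈ C, (pvW t i.toNat).take kn = (pvW t i'.toNat).take kn) →
    (∀ i ∈ C, ∀ jn : Nat, jn < 2 * t.length → (jn : Int) ∉ C →
      (pvW t i.toNat).take kn < (pvW t jn).take kn) →
    (pvLoop (t ++ t) (t.reverse ++ t.reverse) (t.length : Int) r (kn : Int) C ≠ [] ∧
      ∀ i ∈ pvLoop (t ++ t) (t.reverse ++ t.reverse) (t.length : Int) r (kn : Int) C,
        (∃ jn : Nat, i = (jn : Int) ∧ jn < 2 * t.length) ∧
        ∀ jn : Nat, jn < 2 * t.length → pvW t i.toNat ≤ pvW t jn) := by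
  intro r
  induction r with
  | zero =>
    intro kn C hkr hne hcast heq hlt
    simp only [pvLoop]
    refine ⟨hne, fun i hi => ⟨hcast i hi, fun jn hjn => ?_⟩⟩
    have hkn : kn = t.length := by omega
    by_cases hmem : (jn : Int) ∈ C
    · have h1 := heq i hi ((jn : Int)) hmem
      rw [hkn, pv_take_len, pv_take_len] at h1
      simp only [Int.toNat_natCast] at h1
      exact le_of_eq h1
    · have h1 := hlt i hi jn hjn hmem
      rw [hkn, pv_take_len, pv_take_len] at h1
      exact le_of_lt h1
  | succ r ih =>
    intro kn C hkr hne hcast heq hlt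
    have hknlt : kn < t.length := by omega
    simp only [pvLoop]
    by_cases hlen : C.length = 1
    · rw [if_pos hlen]
      obtain ⟨i0, hC⟩ := List.length_eq_one_iff.mp hlen
      subst hC
      refine ⟨by simp, fun i hi => ⟨hcast i hi, fun jn hjn => ?_⟩⟩
      have hii : i = i0 := by simpa using hi
      subst hii
      by_cases hmem : (jn : Int) ∈ [i]
      · have hji : (jn : Int) = i := by simpa using hmem
        have : i.toNat = jn := by omega
        rw [this]
      · have h1 := hlt i hi jn hjn hmem
        exact le_of_lt (pv_lt_of_take_lt kn (by rw [pvW_length, pvW_length]) h1)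
    · rw [if_neg hlen]
      -- the column minimum exists
      obtain ⟨b, hb⟩ : ∃ b, PySem.List.min?
          (C.map fun j => pvAt (t ++ t) (t.reverse ++ t.reverse) (t.length : Int) j (kn : Int))
          (fun x => x) = some b := by
        cases hmin : PySem.List.min?
            (C.map fun j => pvAt (t ++ t) (t.reverse ++ t.reverse) (t.length : Int) j (kn : Int))
            (fun x => x) with
        | none =>
          rw [PySem.List.min?_eq_none_iff, List.map_eq_nil_iff] at hmin
          exact absurd hmin hne
        | some v => exact ⟨v, rfl⟩
      simp only [hb, Option.getD_some]
      -- the filtered candidate list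
      set C' := C.filter (fun j =>
        pvAt (t ++ t) (t.reverse ++ t.reverse) (t.length : Int) j (kn : Int) == b) with hC'
      -- column values are pvW entries
      have hcol : ∀ j ∈ C, ∀ jn : Nat, j = (jn : Int) → jn < 2 * t.length →
          pvAt (t ++ t) (t.reverse ++ t.reverse) (t.length : Int) j (kn : Int)
            = (pvW t jn).getD kn 0 := by
        intro j hj jn hjc hjn
        rw [hjc]
        exact pv_at_eq t jn kn hjn hknlt
      -- the minimum is attained
      obtain ⟨i0, hi0C, hi0b⟩ : ∃ i0 ∈ C,
          pvAt (t ++ t) (t.reverse ++ t.reverse) (t.length : Int) i0 (kn : Int) = b := by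
        have := PySem.List.min?_mem hb
        obtain ⟨i0, hi0, hv⟩ := List.mem_map.mp this
        exact ⟨i0, hi0, hv⟩
      have hbmin : ∀ j ∈ C, b ≤ pvAt (t ++ t) (t.reverse ++ t.reverse) (t.length : Int) j (kn : Int) := by
        intro j hj
        exact PySem.List.min?_isMin hb _ (List.mem_map.mpr ⟨j, hj, rfl⟩)
      have hC'sub : ∀ j ∈ C', j ∈ C := fun j hj => (List.mem_filter.mp hj).1
      have hC'val : ∀ j ∈ C',
          pvAt (t ++ t) (t.reverse ++ t.reverse) (t.length : Int) j (kn : Int) = b := by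
        intro j hj
        have := (List.mem_filter.mp hj).2
        exact beq_iff_eq.mp this
      have hC'ne : C' ≠ [] := by
        intro hnil
        have : i0 ∈ C' := List.mem_filter.mpr ⟨hi0C, beq_iff_eq.mpr hi0b⟩
        rw [hnil] at this
        exact absurd this (List.not_mem_nil)
      -- prefixes of survivors at kn+1
      have hpre : ∀ i ∈ C', ∀ iN : Nat, i = (iN : Int) → iN < 2 * t.length →
          (pvW t iN).take (kn + 1) = (pvW t iN).take kn ++ [b] := by
        intro i hi iN hic hiN
        rw [pv_take_succ t iN kn hknlt]
        have h1 := hC'val i hi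
        rw [hcol i (hC'sub i hi) iN hic hiN] at h1
        rw [h1]
      have hcast' : ∀ j ∈ C', ∃ jn : Nat, j = (jn : Int) ∧ jn < 2 * t.length :=
        fun j hj => hcast j (hC'sub j hj)
      have hcast'' : ∀ kk : Int, (kk : Int) ∈ C' → ((kk.toNat : Nat) : Int) = kk ∧ kk.toNat < 2 * t.length := by
        intro kk hkk
        obtain ⟨jn, hjc, hjn⟩ := hcast' kk hkk
        subst hjc
        simp
        omega
      have heq' : ∀ i ∈ C', ∀ i' ∈ C',
          (pvW t i.toNat).take (kn + 1) = (pvW t i'.toNat).take (kn + 1) := by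
        intro i hi i' hi'
        obtain ⟨hic, hiN⟩ := hcast'' i hi
        obtain ⟨hic', hiN'⟩ := hcast'' i' hi'
        rw [hpre i hi i.toNat hic.symm hiN, hpre i' hi' i'.toNat hic'.symm hiN']
        rw [heq i (hC'sub i hi) i' (hC'sub i' hi')]
      have hlt' : ∀ i ∈ C', ∀ jn : Nat, jn < 2 * t.length → (jn : Int) ∉ C' →
          (pvW t i.toNat).take (kn + 1) < (pvW t jn).take (kn + 1) := by
        intro i hi jn hjn hmem
        obtain ⟨hic, hiN⟩ := hcast'' i hi
        rw [hpre i hi i.toNat hic.symm hiN]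
        by_cases hjC : (jn : Int) ∈ C
        · -- jn survived to C but was eliminated by the filter: its column is strictly above b
          have hne_b : pvAt (t ++ t) (t.reverse ++ t.reverse) (t.length : Int) ((jn : Int)) (kn : Int) ≠ b := by
            intro hcontra
            exact hmem (List.mem_filter.mpr ⟨hjC, beq_iff_eq.mpr hcontra⟩)
          have hge_b := hbmin ((jn : Int)) hjC
          have hgt : b < (pvW t jn).getD kn 0 := by
            rw [hcol ((jn : Int)) hjC jn rfl hjn] at hne_b hge_b
            exact lt_of_le_of_ne hge_b (Ne.symm hne_b)
          rw [pv_take_succ t jn kn hknlt]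
          have hPeq : (pvW t i.toNat).take kn = (pvW t jn).take kn := by
            have := heq i (hC'sub i hi) ((jn : Int)) hjC
            simpa using this
          rw [hPeq]
          exact pv_append_singleton_lt _ hgt
        · -- jn was eliminated before: strict at kn already
          have h1 := hlt i (hC'sub i hi) jn hjn hjC
          rw [pv_take_succ t jn kn hknlt]
          refine pv_lex_append _ _ ?_ h1
          rw [List.length_take, List.length_take, pvW_length, pvW_length]
      have harg : ((kn : Int) + 1) = (((kn + 1 : Nat)) : Int) := by push_cast; ring
      rw [harg]
      exact ih (kn + 1) C' (by omega) hC'ne hcast' heq' hlt'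

theorem canonical_trace_spec : Claim_equal_canonical_trace := by
  intro t _ hne
  simp only [Spec_canonical_trace, canonical_trace, canonical_trace_alt]
  have hlen : 0 < t.length := by
    cases t with
    | nil => exact absurd rfl hne
    | cons a l => simp
  -- A's rotation list, as maps
  rw [PySem.List.foldl_append_singleton_eq_map
        (fun i => PySem.List.slice t (some i) none ++ PySem.List.slice t none (some i)),
      PySem.List.foldl_append_singleton_eq_map
        (fun i => PySem.List.slice t.reverse (some i) none ++ PySem.List.slice t.reverse none (some i))]
  simp only [List.nil_append]
  set R := PySem.List.pyRange 0 (t.length : Int) 1 with hRdef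
  set L := (R.map fun i => PySem.List.slice t (some i) none ++ PySem.List.slice t none (some i)) ++
           (R.map fun i => PySem.List.slice t.reverse (some i) none ++ PySem.List.slice t.reverse none (some i)) with hLdef
  -- membership characterisation of L
  have hLmem : ∀ y ∈ L, ∃ jn : Nat, jn < 2 * t.length ∧ y = pvW t jn := by
    intro y hy
    rw [hLdef] at hy
    rcases List.mem_append.mp hy with h | h
    · obtain ⟨i, hiR, hyi⟩ := List.mem_map.mp h
      obtain ⟨hi0, hi1⟩ := PySem.List.mem_pyRange_one.mp hiR
      have hik : i = ((i.toNat : Nat) : Int) := by omega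
      refine ⟨i.toNat, by omega, ?_⟩
      rw [← hyi, hik, pv_rotA_eq t i.toNat (by omega)]
      congr 1
    · obtain ⟨i, hiR, hyi⟩ := List.mem_map.mp h
      obtain ⟨hi0, hi1⟩ := PySem.List.mem_pyRange_one.mp hiR
      have hik : i = ((i.toNat : Nat) : Int) := by omega
      refine ⟨t.length + i.toNat, by omega, ?_⟩
      rw [← hyi, hik, pv_rotR_eq t i.toNat (by omega)]
      congr 1
  have hLmem' : ∀ jn : Nat, jn < 2 * t.length → pvW t jn ∈ L := by
    intro jn hjn
    rw [hLdef]
    by_cases h : jn < t.length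
    · refine List.mem_append_left _ (List.mem_map.mpr ⟨(jn : Int), ?_, ?_⟩)
      · exact PySem.List.mem_pyRange_one.mpr ⟨by omega, by omega⟩
      · exact pv_rotA_eq t jn h
    · refine List.mem_append_right _ (List.mem_map.mpr ⟨((jn - t.length : Nat) : Int), ?_, ?_⟩)
      · exact PySem.List.mem_pyRange_one.mpr ⟨by omega, by omega⟩
      · rw [pv_rotR_eq t (jn - t.length) (by omega)]
        congr 1
        omega
  -- run the loop invariant from the initial candidate list
  have hinit := pv_loop_spec t t.length 0 (PySem.List.pyRange 0 (2 * (t.length : Int)) 1)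
    (by omega)
    (by
      rw [PySem.List.pyRange_one_cons (by omega)]
      simp)
    (by
      intro j hj
      obtain ⟨h0, h1⟩ := PySem.List.mem_pyRange_one.mp hj
      exact ⟨j.toNat, by omega, by omega⟩)
    (by intro i _ i' _; simp)
    (by
      intro i _ jn hjn hmem
      exact absurd (PySem.List.mem_pyRange_one.mpr ⟨by omega, by omega⟩) hmem)
  have hz : ((0 : Nat) : Int) = (0 : Int) := rfl
  rw [hz] at hinit
  obtain ⟨hCne, hCspec⟩ := hinit
  cases hC : pvLoop (t ++ t) (t.reverse ++ t.reverse) (t.length : Int) t.length 0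
      (PySem.List.pyRange 0 (2 * (t.length : Int)) 1) with
  | nil => exact absurd hC hCne
  | cons c rest =>
    rw [hC] at hCspec
    obtain ⟨⟨cn, hcn, hcnlt⟩, hcmin⟩ := hCspec c (by simp)
    subst hcn
    -- B's output is pvW t cn
    have hBout :
        (if (cn : Int) < (t.length : Int)
          then PySem.List.slice (t ++ t) (some (cn : Int)) (some ((cn : Int) + (t.length : Int)))
          else PySem.List.slice (t.reverse ++ t.reverse) (some ((cn : Int) - (t.length : Int)))
                 (some ((cn : Int) - (t.length : Int) + (t.length : Int))))
          = pvW t cn := pv_rot_slice_eq t cn hcnlt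
    -- A's minimum exists
    obtain ⟨mA, hmA⟩ : ∃ mA, PySem.List.min? L (fun x => x) = some mA := by
      cases h : PySem.List.min? L (fun x => x) with
      | none =>
        rw [PySem.List.min?_eq_none_iff] at h
        have := hLmem' 0 (by omega)
        rw [h] at this
        exact absurd this (List.not_mem_nil)
      | some v => exact ⟨v, rfl⟩
    rw [hmA]
    simp only [Int.toNat_natCast] at hcmin
    show mA = (if (cn : Int) < (t.length : Int)
      then PySem.List.slice (t ++ t) (some (cn : Int)) (some ((cn : Int) + (t.length : Int)))
      else PySem.List.slice (t.reverse ++ t.reverse) (some ((cn : Int) - (t.length : Int)))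
             (some ((cn : Int) - (t.length : Int) + (t.length : Int))))
    rw [hBout]
    exact pv_min_eq mA (pvW t cn) hmA (hLmem' cn hcnlt)
      (fun y hy => by
        obtain ⟨jn, hjn, hyw⟩ := hLmem y hy
        rw [hyw]
        exact hcmin jn hjn)
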